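-- pv_equiv track=rewrite | github.com/Kim-yerin0904/baekjooon | programmers/힙_더 맵게.py | solution
-- ===== SOURCE A (Python) =====
-- import heapq
--
-- def solution(scoville, K):
--     answer = 0
--     heapq.heapify(scoville)
--     while (len(scoville) > 1):
--         if scoville[0] < K:
--             a=heapq.heappop(scoville)
--             b=heapq.heappop(scoville)
--             new_food =a + (b*2)
--             heapq.heappush(scoville,new_food)
--             answer += 1
--         else:
--             break
--     if scoville[0] < K:
--         return -1
--     else:
--         return answer
-- ===== SOURCE B (Python) =====
-- def solution(scoville, K):
--     # No heap and no sorted order: each round, one linear pass finds the two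
--     # smallest values; remove them and append their combination to the plain list.
--     # (Mutates `scoville` like A does, but leaves a different residual order.)
--     count = 0
--     while len(scoville) > 1:
--         a, b = scoville[0], scoville[1]
--         if a > b:
--             a, b = b, a
--         for x in scoville[2:]:
--             if x < a:
--                 a, b = x, a
--             elif x < b:
--                 b = x
--         if a >= K:
--             break
--         scoville.remove(a)
--         scoville.remove(b)
--         scoville.append(a + 2 * b)
--         count += 1
--     return -1 if min(scoville) < K else count
-- ===== Notes on version B (the rewrite author's own statement) =====
-- stated objective: alternative
-- what changed: Drops the heap entirely: the list stays unordered and each round a single linear pass tracks the two smallest values (selection scan), which are then removed by value and the combination appended to the plain list.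
-- outside the precondition, e.g. on solution([], 7): A raises IndexError, B raises ValueError
import Mathlib
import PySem

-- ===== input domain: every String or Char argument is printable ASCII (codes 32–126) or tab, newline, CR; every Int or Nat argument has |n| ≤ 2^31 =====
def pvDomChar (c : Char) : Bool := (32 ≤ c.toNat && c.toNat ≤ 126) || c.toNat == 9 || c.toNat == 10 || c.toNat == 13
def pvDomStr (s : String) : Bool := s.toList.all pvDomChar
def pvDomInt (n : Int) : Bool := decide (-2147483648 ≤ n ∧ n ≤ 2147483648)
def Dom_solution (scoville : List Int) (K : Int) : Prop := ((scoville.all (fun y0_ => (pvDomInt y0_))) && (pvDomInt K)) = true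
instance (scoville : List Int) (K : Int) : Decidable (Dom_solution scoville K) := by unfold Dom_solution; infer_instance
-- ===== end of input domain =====

-- B drops A's heap entirely: the list stays unordered and each round one linear pass finds the
-- two smallest values, which are removed by value and replaced by their combination (same
-- repeated-combine result, no priority-queue structure); equivalence is about the RETURN value
-- only — both Pythons mutate `scoville` in place and leave different residual orders.

-- ===== PORT A =====
-- A's heap is a List Int holding the heap's elements; the heapq library calls are ported by their
-- contract: heappop removes and returns the smallest element (among equal ties all popped VALUES
-- coincide, so the returned value is exact), heappush appends, heapify only reorders in place
-- (multiset unchanged) and makes scoville[0] the minimum — so each read of scoville[0] on the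
-- heapified list is ported as the minimum of the list.
def pvMinD (l : List Int) : Int := (PySem.List.min? l (fun y => y)).getD 0

theorem pvMinD_mem (l : List Int) (h : l ≠ []) : pvMinD l ∈ l := by
  unfold pvMinD
  cases hm : PySem.List.min? l (fun y => y) with
  | none => exact absurd ((PySem.List.min?_eq_none_iff l _).mp hm) h
  | some m => simpa using PySem.List.min?_mem hm

theorem pvErase_len (l : List Int) (h : l ≠ []) : (l.erase (pvMinD l)).length = l.length - 1 := by
  rw [List.length_erase_of_mem (pvMinD_mem l h)]

-- the while loop of A: a = heappop (the minimum), b = heappop (the minimum of the rest),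
-- heappush (a + b*2), count; on break (or len ≤ 1) the final scoville[0] < K check
def pvHeapLoop (K : Int) (l : List Int) (ans : Int) : Int :=
  if h : l.length > 1 then
    if pvMinD l < K then
      pvHeapLoop K ((l.erase (pvMinD l)).erase (pvMinD (l.erase (pvMinD l)))
        ++ [pvMinD l + (pvMinD (l.erase (pvMinD l))) * 2]) (ans + 1)
    else (if pvMinD l < K then -1 else ans)
  else (if pvMinD l < K then -1 else ans)
termination_by l.length
decreasing_by
  have h1 : l ≠ [] := by intro hn; simp [hn] at h
  have e1 : (l.erase (pvMinD l)).length = l.length - 1 := pvErase_len l h1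
  have h2 : l.erase (pvMinD l) ≠ [] := by
    intro hn; rw [hn] at e1; simp at e1; omega
  have e2 := pvErase_len (l.erase (pvMinD l)) h2
  simp only [List.length_append, List.length_cons, List.length_nil, e2, e1]
  omega

def solution (scoville : List Int) (K : Int) : Int :=
  pvHeapLoop K scoville 0               -- answer = 0; heapq.heapify(scoville); while …

-- ===== PORT B =====
-- the body of B's for-loop: update the running pair (a, b) of the two smallest seen so far
def pvScanStep (p : Int × Int) (x : Int) : Int × Int :=
  if x < p.1 then (x, p.1) else if x < p.2 then (p.1, x) else p

-- a, b = scoville[0], scoville[1]; swap if a > b; then the single pass over scoville[2:]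
def pvTwoMin (x0 x1 : Int) (rest : List Int) : Int × Int :=
  rest.foldl pvScanStep (if x0 > x1 then (x1, x0) else (x0, x1))

-- loop invariant of the scan (needed by pvScanLoop's termination proof, cited below):
-- the running pair is ordered and is the two smallest of everything seen so far
theorem pvScan_inv (rest : List Int) : ∀ (a b : Int) (r : List Int), a ≤ b → (∀ y ∈ r, b ≤ y) →
    ∃ r', (rest.foldl pvScanStep (a, b)).1 ≤ (rest.foldl pvScanStep (a, b)).2 ∧
      (a :: b :: (r ++ rest)).Perm
        ((rest.foldl pvScanStep (a, b)).1 :: (rest.foldl pvScanStep (a, b)).2 :: r') ∧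
      (∀ y ∈ r', (rest.foldl pvScanStep (a, b)).2 ≤ y) := by
  induction rest with
  | nil =>
      intro a b r hab hr
      exact ⟨r, hab, by simp, hr⟩
  | cons x rest ih =>
      intro a b r hab hr
      simp only [List.foldl_cons]
      by_cases h1 : x < a
      · have step : pvScanStep (a, b) x = (x, a) := by simp [pvScanStep, h1]
        rw [step]
        obtain ⟨r', ha', hp', hr'⟩ := ih x a (b :: r) (le_of_lt h1)
          (by intro y hy; rcases List.mem_cons.mp hy with rfl | hy
              · exact hab
              · exact le_trans hab (hr y hy))
        refine ⟨r', ha', List.Perm.trans ?_ hp', hr'⟩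
        rw [List.perm_iff_count]; intro c
        simp only [List.count_cons, List.count_append]
        split_ifs <;> omega
      · by_cases h2 : x < b
        · have step : pvScanStep (a, b) x = (a, x) := by simp [pvScanStep, h1, h2]
          rw [step]
          obtain ⟨r', ha', hp', hr'⟩ := ih a x (b :: r) (by omega)
            (by intro y hy; rcases List.mem_cons.mp hy with rfl | hy
                · omega
                · exact le_trans (le_of_lt h2) (hr y hy))
          refine ⟨r', ha', List.Perm.trans ?_ hp', hr'⟩
          rw [List.perm_iff_count]; intro c
          simp only [List.count_cons, List.count_append]
          split_ifs <;> omega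
        · have step : pvScanStep (a, b) x = (a, b) := by simp [pvScanStep, h1, h2]
          rw [step]
          obtain ⟨r', ha', hp', hr'⟩ := ih a b (x :: r) hab
            (by intro y hy; rcases List.mem_cons.mp hy with rfl | hy
                · omega
                · exact hr y hy)
          refine ⟨r', ha', List.Perm.trans ?_ hp', hr'⟩
          rw [List.perm_iff_count]; intro c
          simp only [List.count_cons, List.count_append]
          split_ifs <;> omega

-- the scan returns the two smallest elements of x0 :: x1 :: rest, smallest first
theorem pvTwoMin_spec (x0 x1 : Int) (rest : List Int) :
    ∃ r', (pvTwoMin x0 x1 rest).1 ≤ (pvTwoMin x0 x1 rest).2 ∧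
      (x0 :: x1 :: rest).Perm ((pvTwoMin x0 x1 rest).1 :: (pvTwoMin x0 x1 rest).2 :: r') ∧
      (∀ y ∈ r', (pvTwoMin x0 x1 rest).2 ≤ y) := by
  unfold pvTwoMin
  by_cases h : x0 > x1
  · rw [if_pos h]
    obtain ⟨r', ha', hp', hr'⟩ := pvScan_inv rest x1 x0 [] (le_of_lt h) (by simp)
    refine ⟨r', ha', List.Perm.trans ?_ (by simpa using hp'), hr'⟩
    exact List.Perm.swap x1 x0 rest
  · rw [if_neg h]
    obtain ⟨r', ha', hp', hr'⟩ := pvScan_inv rest x0 x1 [] (by omega) (by simp)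
    exact ⟨r', ha', by simpa using hp', hr'⟩

theorem pvTwoMin_mem1 (x0 x1 : Int) (rest : List Int) :
    (pvTwoMin x0 x1 rest).1 ∈ x0 :: x1 :: rest := by
  obtain ⟨r', _, hp, _⟩ := pvTwoMin_spec x0 x1 rest
  exact hp.mem_iff.mpr (by simp)

theorem pvTwoMin_mem2 (x0 x1 : Int) (rest : List Int) :
    (pvTwoMin x0 x1 rest).2 ∈ (x0 :: x1 :: rest).erase (pvTwoMin x0 x1 rest).1 := by
  obtain ⟨r', _, hp, _⟩ := pvTwoMin_spec x0 x1 rest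
  have h := hp.erase (pvTwoMin x0 x1 rest).1
  rw [List.erase_cons_head] at h
  exact h.mem_iff.mpr (by simp)

-- the while loop of B: one pass finds the two smallest a ≤ b; if a ≥ K break (then the final
-- `min(scoville) < K` check), else scoville.remove(a); scoville.remove(b); append a + 2*b.
-- list.remove is exact as List.erase here: the scan's results are members (pvTwoMin_mem1/2),
-- so Python's remove cannot raise, and both remove the first equal occurrence.
-- min(scoville) on the nonempty list is ported with PySem.List.min? (as pvMinD).
def pvScanLoop (K : Int) (s : List Int) (cnt : Int) : Int :=
  match s with
  | x0 :: x1 :: rest =>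
    if (pvTwoMin x0 x1 rest).1 ≥ K then
      (if pvMinD (x0 :: x1 :: rest) < K then -1 else cnt)
    else
      pvScanLoop K (((x0 :: x1 :: rest).erase (pvTwoMin x0 x1 rest).1).erase (pvTwoMin x0 x1 rest).2
        ++ [(pvTwoMin x0 x1 rest).1 + 2 * (pvTwoMin x0 x1 rest).2]) (cnt + 1)
  | t => if pvMinD t < K then -1 else cnt
termination_by s.length
decreasing_by
  have e1 := List.length_erase_of_mem (pvTwoMin_mem1 x0 x1 rest)
  have e2 := List.length_erase_of_mem (pvTwoMin_mem2 x0 x1 rest)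
  simp only [List.length_append, e2, e1, List.length_cons, List.length_nil]
  omega

def solution_alt (scoville : List Int) (K : Int) : Int :=
  pvScanLoop K scoville 0               -- count = 0; while …; return -1 if min(scoville) < K else count

-- ===== PRECONDITION & SPEC =====
-- Pre_ excludes only the empty list, on which both Pythons raise (A IndexError at scoville[0],
-- B ValueError at min(scoville)).
def Pre_solution (scoville : List Int) (K : Int) : Prop := scoville ≠ []
instance (scoville : List Int) (K : Int) : Decidable (Pre_solution scoville K) := by unfold Pre_solution; infer_instance
def pvWitness_solution : List Int × Int := ([1, 2, 3, 9, 10, 12], 7)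

def Spec_solution (scoville : List Int) (K : Int) (out : Int) : Prop := out = solution_alt scoville K
instance (scoville : List Int) (K : Int) (out : Int) : Decidable (Spec_solution scoville K out) := by unfold Spec_solution; infer_instance

-- ===== CLAIM (what is proved, stated in full; the proofs are below) =====
def Claim_equal_solution : Prop := ∀ (scoville : List Int) (K : Int), Dom_solution scoville K → Pre_solution scoville K → Spec_solution scoville K (solution scoville K)

-- ===== LEMMAS AND PROOFS =====

theorem pvMinD_eq_of (l : List Int) (a : Int) (ha : a ∈ l) (h : ∀ y ∈ l, a ≤ y) :
    pvMinD l = a := by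
  unfold pvMinD
  cases hm : PySem.List.min? l (fun y => y) with
  | none =>
      rw [(PySem.List.min?_eq_none_iff l _).mp hm] at ha
      simp at ha
  | some m =>
      have h1 : m ≤ a := PySem.List.min?_isMin hm a ha
      have h2 : a ≤ m := h m (by simpa using PySem.List.min?_mem hm)
      simp; omega

-- the scan's pair equals (the heap's first pop, the heap's second pop), value-wise
theorem pvTwoMin_eq_minD (x0 x1 : Int) (rest : List Int) :
    (pvTwoMin x0 x1 rest).1 = pvMinD (x0 :: x1 :: rest) ∧
    (pvTwoMin x0 x1 rest).2 = pvMinD ((x0 :: x1 :: rest).erase (pvTwoMin x0 x1 rest).1) := by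
  obtain ⟨r', hab, hp, hr⟩ := pvTwoMin_spec x0 x1 rest
  constructor
  · symm
    apply pvMinD_eq_of _ _ (hp.mem_iff.mpr (by simp))
    intro y hy
    rcases List.mem_cons.mp (hp.mem_iff.mp hy) with rfl | hy'
    · exact le_refl _
    · rcases List.mem_cons.mp hy' with rfl | hy''
      · exact hab
      · exact le_trans hab (hr y hy'')
  · symm
    have he := hp.erase (pvTwoMin x0 x1 rest).1
    rw [List.erase_cons_head] at he
    apply pvMinD_eq_of _ _ (he.mem_iff.mpr (by simp))
    intro y hy
    rcases List.mem_cons.mp (he.mem_iff.mp hy) with rfl | hy'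
    · exact le_refl _
    · exact hr y hy'

theorem pvLoop_eq (K : Int) (n : Nat) : ∀ (l : List Int) (cnt : Int), l.length = n →
    pvHeapLoop K l cnt = pvScanLoop K l cnt := by
  induction n using Nat.strong_induction_on with
  | _ n ih =>
    intro l cnt hn
    match l with
    | [] =>
        rw [pvHeapLoop]
        simp [pvScanLoop]
    | [x] =>
        rw [pvHeapLoop]
        simp [pvScanLoop]
    | x0 :: x1 :: rest =>
        obtain ⟨hfst, hsnd⟩ := pvTwoMin_eq_minD x0 x1 rest
        have hgt : (x0 :: x1 :: rest).length > 1 := by simp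
        rw [pvHeapLoop, dif_pos hgt, pvScanLoop]
        by_cases hK : pvMinD (x0 :: x1 :: rest) < K
        · rw [if_pos hK, if_neg (by omega : ¬ (pvTwoMin x0 x1 rest).1 ≥ K)]
          rw [← hfst, ← hsnd, (mul_comm (pvTwoMin x0 x1 rest).2 2)]
          have e1 := List.length_erase_of_mem (pvTwoMin_mem1 x0 x1 rest)
          have e2 := List.length_erase_of_mem (pvTwoMin_mem2 x0 x1 rest)
          apply ih (n - 1) (by simp at hn; omega)
          simp only [List.length_append, e2, e1, List.length_cons, List.length_nil]
          simp at hn; omega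
        · rw [if_neg hK, if_pos (by omega : (pvTwoMin x0 x1 rest).1 ≥ K)]

-- ===== VERDICT (by name: the statement is the Claim_ definition above) =====
theorem solution_spec : Claim_equal_solution := by
  intro scoville K _ _
  unfold Spec_solution solution solution_alt
  exact pvLoop_eq K scoville.length scoville 0 rfl
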